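-- pv_equiv track=rewrite | github.com/ChristianAlexanderDiaz/WeeklyTimeTrials | src/utils/track_data.py | search_tracks
-- ===== SOURCE A (Python) =====
-- from typing import List, Optional
--
-- MKW_TRACKS: List[str] = [
--     "Mario Bros. Circuit",
--     "Crown City",
--     "Whistlestop Summit",
--     "DK Spaceport",
--     "Desert Hills",
--     "Shy Guy Bazaar",
--     "Wario Stadium",
--     "Airship Fortress",
--     "DK Pass",
--     "Starview Peak",
--     "Sky-High Sundae",
--     "Wario Shipyard",
--     "Koopa Troopa Beach",
--     "Faraway Oasis",
--     "Peach Stadium",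
--     "Peach Beach",
--     "Salty Salty Speedway",
--     "Dino Dino Jungle",
--     "Great ? Block Ruins",
--     "Cheep Cheep Falls",
--     "Dandelion Depths",
--     "Boo Cinema",
--     "Dry Bones Burnout",
--     "Moo Moo Meadows",
--     "Choco Mountain",
--     "Toad's Factory",
--     "Bowser's Castle",
--     "Acorn Heights",
--     "Mario Circuit",
--     "Rainbow Road"
-- ]
--
-- def search_tracks(query: str, limit: int = 25) -> List[str]:
--     """
--     Search for tracks matching a query string.
--
--     This method performs case-insensitive partial matching
--     and is useful for autocomplete functionality.
--
--     Args:
--         query: Search query string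
--         limit: Maximum number of results to return
--
--     Returns:
--         List[str]: List of matching track names
--
--     Example:
--         >>> TrackManager.search_tracks("mario")
--         ["Mario Bros. Circuit", "Mario Circuit"]
--         >>> TrackManager.search_tracks("beach")
--         ["Koopa Troopa Beach", "Peach Beach"]
--     """
--     if not query:
--         return MKW_TRACKS[:limit]
--
--     query_lower = query.lower()
--     matches = []
--
--     # First, add exact matches (case-insensitive)
--     for track in MKW_TRACKS:
--         if track.lower() == query_lower:
--             matches.append(track)
--
--     # Then, add tracks that start with the query
--     for track in MKW_TRACKS:
--         if track.lower().startswith(query_lower) and track not in matches: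
--             matches.append(track)
--
--     # Finally, add tracks that contain the query anywhere
--     for track in MKW_TRACKS:
--         if query_lower in track.lower() and track not in matches:
--             matches.append(track)
--
--     return matches[:limit]
-- ===== SOURCE B (Python) =====
-- from typing import List
--
-- MKW_TRACKS: List[str] = [
--     "Mario Bros. Circuit",
--     "Crown City",
--     "Whistlestop Summit",
--     "DK Spaceport",
--     "Desert Hills",
--     "Shy Guy Bazaar",
--     "Wario Stadium",
--     "Airship Fortress",
--     "DK Pass",
--     "Starview Peak",
--     "Sky-High Sundae",
--     "Wario Shipyard",
--     "Koopa Troopa Beach",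
--     "Faraway Oasis",
--     "Peach Stadium",
--     "Peach Beach",
--     "Salty Salty Speedway",
--     "Dino Dino Jungle",
--     "Great ? Block Ruins",
--     "Cheep Cheep Falls",
--     "Dandelion Depths",
--     "Boo Cinema",
--     "Dry Bones Burnout",
--     "Moo Moo Meadows",
--     "Choco Mountain",
--     "Toad's Factory",
--     "Bowser's Castle",
--     "Acorn Heights",
--     "Mario Circuit",
--     "Rainbow Road"
-- ]
--
-- def search_tracks(query: str, limit: int = 25) -> List[str]:
--     """Single pass over MKW_TRACKS into three priority buckets (exact,
--     prefix, substring); no membership tests or repeated scans needed."""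
--     if not query:
--         return MKW_TRACKS[:limit]
--
--     q = query.lower()
--     exact, prefix, substring = [], [], []
--     for track in MKW_TRACKS:
--         t = track.lower()
--         if t == q:
--             exact.append(track)
--         elif t.startswith(q):
--             prefix.append(track)
--         elif q in t:
--             substring.append(track)
--     return (exact + prefix + substring)[:limit]
-- ===== Notes on version B (the rewrite author's own statement) =====
-- stated objective: simpler
-- what changed: Replaces A's three sequential passes with 'track not in matches' membership scans by a single pass that drops each track into one of three priority buckets via an if/elif chain, then concatenates the buckets; the dedup membership test disappears entirely.
import Mathlib
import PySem

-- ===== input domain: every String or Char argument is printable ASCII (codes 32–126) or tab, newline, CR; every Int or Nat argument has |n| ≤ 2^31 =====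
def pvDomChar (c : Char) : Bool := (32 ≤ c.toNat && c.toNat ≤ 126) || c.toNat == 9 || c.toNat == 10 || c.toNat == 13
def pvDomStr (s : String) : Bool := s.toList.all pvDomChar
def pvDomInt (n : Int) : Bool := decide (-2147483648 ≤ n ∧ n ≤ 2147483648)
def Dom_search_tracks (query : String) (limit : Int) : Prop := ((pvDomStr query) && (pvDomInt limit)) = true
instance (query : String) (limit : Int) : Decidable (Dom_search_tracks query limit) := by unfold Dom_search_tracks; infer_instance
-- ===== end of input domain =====

-- B replaces A's three dedup-scanning passes by one pass into three priority buckets (simpler decomposition; equal results proved).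


-- module constant MKW_TRACKS (shared by both programs)
def pvMKWTracks : List String := [
  "Mario Bros. Circuit",
  "Crown City",
  "Whistlestop Summit",
  "DK Spaceport",
  "Desert Hills",
  "Shy Guy Bazaar",
  "Wario Stadium",
  "Airship Fortress",
  "DK Pass",
  "Starview Peak",
  "Sky-High Sundae",
  "Wario Shipyard",
  "Koopa Troopa Beach",
  "Faraway Oasis",
  "Peach Stadium",
  "Peach Beach",
  "Salty Salty Speedway",
  "Dino Dino Jungle",
  "Great ? Block Ruins",
  "Cheep Cheep Falls",
  "Dandelion Depths",
  "Boo Cinema",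
  "Dry Bones Burnout",
  "Moo Moo Meadows",
  "Choco Mountain",
  "Toad's Factory",
  "Bowser's Castle",
  "Acorn Heights",
  "Mario Circuit",
  "Rainbow Road"]

-- ===== PORT A =====
def search_tracks (query : String) (limit : Int) : List String :=
  if query = "" then PySem.List.slice pvMKWTracks none (some limit)
  else
    let query_lower := PySem.Str.lower query
    -- first pass: exact (case-insensitive) matches
    let matches1 := pvMKWTracks.foldl (fun acc track =>
      if PySem.Str.lower track = query_lower then acc ++ [track] else acc) []
    -- second pass: startswith, skipping tracks already in matches
    let matches2 := pvMKWTracks.foldl (fun acc track =>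
      if PySem.Str.startswith (PySem.Str.lower track) query_lower && !(acc.contains track)
      then acc ++ [track] else acc) matches1
    -- third pass: substring, skipping tracks already in matches
    let matches3 := pvMKWTracks.foldl (fun acc track =>
      if PySem.Str.isIn query_lower (PySem.Str.lower track) && !(acc.contains track)
      then acc ++ [track] else acc) matches2
    PySem.List.slice matches3 none (some limit)

-- ===== PORT B =====
def search_tracks_alt (query : String) (limit : Int) : List String :=
  if query = "" then PySem.List.slice pvMKWTracks none (some limit)
  else
    let q := PySem.Str.lower query
    -- single pass, three priority buckets (exact / prefix / substring)
    let bs := pvMKWTracks.foldl (fun (bs : List String × List String × List String) track =>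
      if PySem.Str.lower track = q then (bs.1 ++ [track], bs.2.1, bs.2.2)
      else if PySem.Str.startswith (PySem.Str.lower track) q then (bs.1, bs.2.1 ++ [track], bs.2.2)
      else if PySem.Str.isIn q (PySem.Str.lower track) then (bs.1, bs.2.1, bs.2.2 ++ [track])
      else bs) ([], [], [])
    PySem.List.slice (bs.1 ++ bs.2.1 ++ bs.2.2) none (some limit)

-- ===== PRECONDITION & SPEC =====
def Spec_search_tracks (query : String) (limit : Int) (out : List String) : Prop := out = search_tracks_alt query limit
instance (query : String) (limit : Int) (out : List String) : Decidable (Spec_search_tracks query limit out) := by unfold Spec_search_tracks; infer_instance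

-- ===== CLAIM (what is proved, stated in full; the proofs are below) =====
def Claim_equal_search_tracks : Prop := ∀ (query : String) (limit : Int), Dom_search_tracks query limit → Spec_search_tracks query limit (search_tracks query limit)

-- ===== LEMMAS AND PROOFS =====

-- the fixed track list has no duplicates, so 'track not in matches' depends only on the track
theorem pvMKWTracks_nodup : pvMKWTracks.Nodup := by
  have h : (pvMKWTracks.map String.toList).Nodup := by decide
  exact h.of_map

-- membership in a filter, as the Bool the dedup test computes
theorem pv_contains_filter {α : Type} [DecidableEq α] (p : α → Bool) (xs : List α)
    (t : α) (ht : t ∈ xs) : (xs.filter p).contains t = p t := by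
  by_cases hp : p t = true
  · simp [List.mem_filter, ht, hp]
  · simp only [Bool.not_eq_true] at hp
    simp [List.mem_filter, hp]

theorem pv_contains_append_filters {α : Type} [DecidableEq α] (p q : α → Bool)
    (xs : List α) (t : α) (ht : t ∈ xs) :
    (xs.filter p ++ xs.filter q).contains t = (p t || q t) := by
  simp [List.mem_filter, ht]

-- A's second/third pass: append-if-with-dedup over a duplicate-free list, when membership in
-- the accumulator is characterised by Q on every list element, is a plain filter appended.
theorem pv_foldl_append_if_notmem {α : Type} [DecidableEq α]
    (p Q : α → Bool) (xs : List α) (acc : List α)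
    (hnd : xs.Nodup) (h : ∀ t ∈ xs, acc.contains t = Q t) :
    xs.foldl (fun acc t => if p t && !(acc.contains t) then acc ++ [t] else acc) acc
      = acc ++ xs.filter (fun t => p t && !(Q t)) := by
  induction xs generalizing acc with
  | nil => simp
  | cons x xs ih =>
    have hx : acc.contains x = Q x := h x (by simp)
    have hnd' : xs.Nodup := hnd.of_cons
    have hxmem : x ∉ xs := (List.nodup_cons.mp hnd).1
    simp only [List.foldl_cons, List.filter_cons, hx]
    by_cases hc : (p x && !(Q x)) = true
    · rw [if_pos hc, if_pos hc,
        ih (acc ++ [x]) hnd' (fun t ht => by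
          have hne : t ≠ x := fun he => hxmem (he ▸ ht)
          simpa [hne] using h t (List.mem_cons_of_mem x ht)),
        List.append_assoc]
      simp
    · rw [if_neg hc, if_neg hc, ih acc hnd' (fun t ht => h t (List.mem_cons_of_mem x ht))]

-- B's single pass: the three buckets are three filters by the elif-chain conditions.
theorem pv_foldl_buckets {α : Type} (E : α → Prop) [DecidablePred E] (s c : α → Bool)
    (xs : List α) (b0 b1 b2 : List α) :
    xs.foldl (fun (bs : List α × List α × List α) t =>
        if E t then (bs.1 ++ [t], bs.2.1, bs.2.2)
        else if s t then (bs.1, bs.2.1 ++ [t], bs.2.2)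
        else if c t then (bs.1, bs.2.1, bs.2.2 ++ [t])
        else bs) (b0, b1, b2)
      = (b0 ++ xs.filter (fun t => decide (E t)),
         b1 ++ xs.filter (fun t => !(decide (E t)) && s t),
         b2 ++ xs.filter (fun t => !(decide (E t)) && !(s t) && c t)) := by
  induction xs generalizing b0 b1 b2 with
  | nil => simp
  | cons x xs ih =>
    simp only [List.foldl_cons, List.filter_cons]
    by_cases he : E x
    · simp [he, ih]
    · by_cases hs : s x = true
      · simp [he, hs, ih]
      · by_cases hc : c x = true
        · simp [he, hs, hc, ih]
        · simp [he, hs, hc, ih]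

-- A's three passes, specialised to the track list
theorem pvA1 (ql : String) :
    List.foldl (fun acc track => if PySem.Str.lower track = ql then acc ++ [track] else acc)
      [] pvMKWTracks
      = pvMKWTracks.filter (fun t => decide (PySem.Str.lower t = ql)) := by
  simpa using PySem.List.foldl_append_ite_eq_filter
    (fun track => PySem.Str.lower track = ql) pvMKWTracks []

theorem pvA2 (ql : String) :
    List.foldl (fun acc track =>
        if PySem.Str.startswith (PySem.Str.lower track) ql && !(acc.contains track)
        then acc ++ [track] else acc)
      (pvMKWTracks.filter (fun t => decide (PySem.Str.lower t = ql))) pvMKWTracks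
      = pvMKWTracks.filter (fun t => decide (PySem.Str.lower t = ql))
        ++ pvMKWTracks.filter (fun t =>
            PySem.Str.startswith (PySem.Str.lower t) ql && !(decide (PySem.Str.lower t = ql))) :=
  pv_foldl_append_if_notmem _ _ pvMKWTracks _ pvMKWTracks_nodup
    (fun t ht => pv_contains_filter _ pvMKWTracks t ht)

theorem pvA3 (ql : String) :
    List.foldl (fun acc track =>
        if PySem.Str.isIn ql (PySem.Str.lower track) && !(acc.contains track)
        then acc ++ [track] else acc)
      (pvMKWTracks.filter (fun t => decide (PySem.Str.lower t = ql))
        ++ pvMKWTracks.filter (fun t =>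
            PySem.Str.startswith (PySem.Str.lower t) ql && !(decide (PySem.Str.lower t = ql))))
      pvMKWTracks
      = (pvMKWTracks.filter (fun t => decide (PySem.Str.lower t = ql))
        ++ pvMKWTracks.filter (fun t =>
            PySem.Str.startswith (PySem.Str.lower t) ql && !(decide (PySem.Str.lower t = ql))))
        ++ pvMKWTracks.filter (fun t =>
            PySem.Str.isIn ql (PySem.Str.lower t)
              && !(decide (PySem.Str.lower t = ql)
                    || (PySem.Str.startswith (PySem.Str.lower t) ql
                          && !(decide (PySem.Str.lower t = ql))))) :=
  pv_foldl_append_if_notmem _ _ pvMKWTracks _ pvMKWTracks_nodup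
    (fun t ht => pv_contains_append_filters _ _ pvMKWTracks t ht)

-- B's single pass, specialised to the track list
theorem pvB (ql : String) :
    (List.foldl (fun (bs : List String × List String × List String) track =>
        if PySem.Str.lower track = ql then (bs.1 ++ [track], bs.2.1, bs.2.2)
        else if PySem.Str.startswith (PySem.Str.lower track) ql then (bs.1, bs.2.1 ++ [track], bs.2.2)
        else if PySem.Str.isIn ql (PySem.Str.lower track) then (bs.1, bs.2.1, bs.2.2 ++ [track])
        else bs) ([], [], []) pvMKWTracks).1
      ++ (List.foldl (fun (bs : List String × List String × List String) track =>
        if PySem.Str.lower track = ql then (bs.1 ++ [track], bs.2.1, bs.2.2)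
        else if PySem.Str.startswith (PySem.Str.lower track) ql then (bs.1, bs.2.1 ++ [track], bs.2.2)
        else if PySem.Str.isIn ql (PySem.Str.lower track) then (bs.1, bs.2.1, bs.2.2 ++ [track])
        else bs) ([], [], []) pvMKWTracks).2.1
      ++ (List.foldl (fun (bs : List String × List String × List String) track =>
        if PySem.Str.lower track = ql then (bs.1 ++ [track], bs.2.1, bs.2.2)
        else if PySem.Str.startswith (PySem.Str.lower track) ql then (bs.1, bs.2.1 ++ [track], bs.2.2)
        else if PySem.Str.isIn ql (PySem.Str.lower track) then (bs.1, bs.2.1, bs.2.2 ++ [track])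
        else bs) ([], [], []) pvMKWTracks).2.2
      = pvMKWTracks.filter (fun t => decide (PySem.Str.lower t = ql))
        ++ pvMKWTracks.filter (fun t =>
            !(decide (PySem.Str.lower t = ql)) && PySem.Str.startswith (PySem.Str.lower t) ql)
        ++ pvMKWTracks.filter (fun t =>
            !(decide (PySem.Str.lower t = ql)) && !(PySem.Str.startswith (PySem.Str.lower t) ql)
              && PySem.Str.isIn ql (PySem.Str.lower t)) := by
  have h := pv_foldl_buckets (fun track => PySem.Str.lower track = ql)
    (fun track => PySem.Str.startswith (PySem.Str.lower track) ql)
    (fun track => PySem.Str.isIn ql (PySem.Str.lower track)) pvMKWTracks [] [] []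
  rw [h]
  simp

-- ===== VERDICT (by name: the statement is the Claim_ definition above) =====
theorem search_tracks_spec : Claim_equal_search_tracks := by
  intro query limit _
  unfold Spec_search_tracks search_tracks search_tracks_alt
  by_cases hq : query = ""
  · simp [hq]
  · simp only [if_neg hq]
    rw [pvA1, pvA2, pvA3, pvB]
    have hf1 : pvMKWTracks.filter (fun t =>
          !(decide (PySem.Str.lower t = PySem.Str.lower query))
            && PySem.Str.startswith (PySem.Str.lower t) (PySem.Str.lower query))
        = pvMKWTracks.filter (fun t =>
          PySem.Str.startswith (PySem.Str.lower t) (PySem.Str.lower query)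
            && !(decide (PySem.Str.lower t = PySem.Str.lower query))) :=
      List.filter_congr (fun t _ => Bool.and_comm _ _)
    have hf2 : pvMKWTracks.filter (fun t =>
          !(decide (PySem.Str.lower t = PySem.Str.lower query))
            && !(PySem.Str.startswith (PySem.Str.lower t) (PySem.Str.lower query))
            && PySem.Str.isIn (PySem.Str.lower query) (PySem.Str.lower t))
        = pvMKWTracks.filter (fun t =>
          PySem.Str.isIn (PySem.Str.lower query) (PySem.Str.lower t)
            && !(decide (PySem.Str.lower t = PySem.Str.lower query)
                  || (PySem.Str.startswith (PySem.Str.lower t) (PySem.Str.lower query)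
                        && !(decide (PySem.Str.lower t = PySem.Str.lower query))))) :=
      List.filter_congr (fun t _ => by
        cases hE : decide (PySem.Str.lower t = PySem.Str.lower query) <;>
          cases hS : PySem.Str.startswith (PySem.Str.lower t) (PySem.Str.lower query) <;>
            cases hC : PySem.Str.isIn (PySem.Str.lower query) (PySem.Str.lower t) <;>
              simp [hE, hS, hC])
    rw [hf1, hf2]
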